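-- pv_equiv track=rewrite | github.com/MSebeke/Master | Benchmarking_And_Data/SProject6Rerework.py | CheckSequences
-- ===== SOURCE A (Python) =====
-- def CheckSequences(x):
--     DeletionList=[]
--     for entry in x:
--         SeqSet=set(x[entry])
--         try:
--             SeqSet.remove("A")
--         except:
--             pass
--         try:
--             SeqSet.remove("U")
--         except:
--             pass
--         try:
--             SeqSet.remove("C")
--         except:
--             pass
--         try:
--             SeqSet.remove("G")
--         except:
--             pass
--         if len(SeqSet) != 0:
--             DeletionList.append(entry)
--     for entry in DeletionList:
--         del x[entry]
--     return x
-- ===== SOURCE B (Python) =====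
-- def CheckSequences(x):
--     # One-pass dict comprehension keeping the clean sequences, then replace the
--     # contents of the original dict in place (same object is returned, as in A).
--     kept = {k: v for k, v in x.items() if all(c in "AUCG" for c in v)}
--     x.clear()
--     x.update(kept)
--     return x
-- ===== Notes on version B (the rewrite author's own statement) =====
-- stated objective: simpler
-- what changed: Replaces the per-entry set construction with four try/remove steps and a two-phase collect-then-delete loop by a single dict-comprehension pass that keeps entries whose characters are all in 'AUCG', then refills the original dict in place (no per-entry set allocation).
import Mathlib
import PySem

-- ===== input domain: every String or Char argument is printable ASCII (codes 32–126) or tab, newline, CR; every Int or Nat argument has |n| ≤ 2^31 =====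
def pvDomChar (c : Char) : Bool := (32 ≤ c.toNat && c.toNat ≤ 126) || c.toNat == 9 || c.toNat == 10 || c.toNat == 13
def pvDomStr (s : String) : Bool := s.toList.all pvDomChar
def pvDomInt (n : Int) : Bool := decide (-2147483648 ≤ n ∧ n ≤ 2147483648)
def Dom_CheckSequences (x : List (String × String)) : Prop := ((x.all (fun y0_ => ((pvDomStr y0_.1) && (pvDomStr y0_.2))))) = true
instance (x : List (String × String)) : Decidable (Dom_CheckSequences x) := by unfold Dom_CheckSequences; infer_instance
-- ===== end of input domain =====

-- B replaces A's per-entry set-build-and-remove and two-phase collect-then-delete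
-- by a single filtering pass (objective: simpler). Both Pythons mutate the caller's
-- dict in place and return it; the equivalence proved here is about the returned mapping.


-- ===== PORT A =====
def CheckSequences (x : List (String × String)) : List (String × String) :=
  let d : PySem.Dict String String := PySem.Dict.mk x
  -- for entry in x: SeqSet = set(x[entry]); four 'try: SeqSet.remove(c) except: pass'
  -- ('try remove / except pass' is exactly PySem.Set.discard); x[entry] always
  -- succeeds because entry ranges over d's keys, so it is ported as getD with "".
  let deletionList := d.keys.foldl (fun acc entry =>
    let s0 : PySem.Set Char := PySem.Set.ofList (d.getD entry "").toList
    let s1 := PySem.Set.discard s0 'A'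
    let s2 := PySem.Set.discard s1 'U'
    let s3 := PySem.Set.discard s2 'C'
    let s4 := PySem.Set.discard s3 'G'
    if PySem.Set.len s4 ≠ 0 then acc ++ [entry] else acc) []
  -- for entry in DeletionList: del x[entry]
  (deletionList.foldl (fun dd entry => dd.erase entry) d).items

-- ===== PORT B =====
def CheckSequences_alt (x : List (String × String)) : List (String × String) :=
  -- kept = {k: v for k, v in x.items() if all(c in "AUCG" for c in v)};
  -- x.clear(); x.update(kept); return x — on an assoc list with unique keys
  -- this is exactly a filter of the items in order.
  x.filter (fun p => p.2.toList.all (fun c => "AUCG".toList.contains c))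

-- ===== PRECONDITION & SPEC =====
-- Pre_ excludes association lists with duplicate keys: a Python dict (the actual
-- argument type of both A and B) can never contain them.
def Pre_CheckSequences (x : List (String × String)) : Prop := (x.map Prod.fst).Nodup
instance (x : List (String × String)) : Decidable (Pre_CheckSequences x) := by unfold Pre_CheckSequences; infer_instance
def pvWitness_CheckSequences : (List (String × String)) := [("s1", "AUG"), ("s2", "AXC")]
def Spec_CheckSequences (x : List (String × String)) (out : List (String × String)) : Prop := out = CheckSequences_alt x
instance (x : List (String × String)) (out : List (String × String)) : Decidable (Spec_CheckSequences x out) := by unfold Spec_CheckSequences; infer_instance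

-- ===== CLAIM (what is proved, stated in full; the proofs are below) =====
def Claim_equal_CheckSequences : Prop := ∀ (x : List (String × String)), Dom_CheckSequences x → Pre_CheckSequences x → Spec_CheckSequences x (CheckSequences x)

-- ===== LEMMAS AND PROOFS =====

-- the four discards leave the set nonempty iff some character lies outside AUCG
lemma bad_iff (v : String) :
    (PySem.Set.len (PySem.Set.discard (PySem.Set.discard (PySem.Set.discard (PySem.Set.discard
        (PySem.Set.ofList v.toList) 'A') 'U') 'C') 'G') ≠ 0)
    ↔ ¬ (v.toList.all (fun c => "AUCG".toList.contains c) = true) := by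
  rw [show ("AUCG".toList) = ['A','U','C','G'] from rfl]
  have h : ∀ (l : List Char), l.length ≠ 0 ↔ ∃ c, c ∈ l := by
    intro l
    cases l <;> simp
  simp only [PySem.Set.len, ne_eq, Int.natCast_eq_zero]
  rw [← ne_eq, h]
  simp only [PySem.Set.mem_discard, PySem.Set.mem_ofList, List.all_eq_true, not_forall]
  constructor
  · rintro ⟨c, ⟨⟨⟨h1, h2⟩, h3⟩, h4⟩, h5⟩
    exact ⟨c, h1, by simp [h2, h3, h4, h5]⟩
  · rintro ⟨c, hc, hn⟩
    simp at hn
    exact ⟨c, ⟨⟨⟨hc, hn.1⟩, hn.2.1⟩, hn.2.2.1⟩, hn.2.2.2⟩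

-- folding Dict.erase over a list of keys filters the items
lemma items_foldl_erase (dl : List String) (d : PySem.Dict String String) :
    (dl.foldl (fun dd entry => dd.erase entry) d).items
      = d.items.filter (fun p => !(dl.contains p.1)) := by
  induction dl generalizing d with
  | nil => simp
  | cons k rest ih =>
      rw [List.foldl_cons, ih]
      simp only [PySem.Dict.erase, List.filter_filter]
      apply List.filter_congr
      intro p _
      by_cases h : p.1 = k <;> simp [h]

-- ===== VERDICT (by name: the statement is the Claim_ definition above) =====
theorem CheckSequences_spec : Claim_equal_CheckSequences := by
  intro x _ hpre
  unfold Spec_CheckSequences CheckSequences CheckSequences_alt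
  show (List.foldl (fun dd entry => dd.erase entry) (PySem.Dict.mk x)
      (List.foldl (fun acc entry =>
        if (PySem.Set.len (PySem.Set.discard (PySem.Set.discard (PySem.Set.discard
            (PySem.Set.discard (PySem.Set.ofList ((PySem.Dict.mk x).getD entry "").toList)
            'A') 'U') 'C') 'G') ≠ 0) then acc ++ [entry] else acc)
        [] (PySem.Dict.mk x).keys)).items
    = List.filter (fun p => p.2.toList.all fun c => "AUCG".toList.contains c) x
  rw [PySem.List.foldl_append_ite_eq_filter, items_foldl_erase]
  apply List.filter_congr
  intro p hp
  have hget : (PySem.Dict.mk x).getD p.1 "" = p.2 :=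
    PySem.Dict.getD_of_mem_items (PySem.Dict.mk x) (k := p.1) (v := p.2)
      (by simpa using hp) hpre ""
  have hmemk : p.1 ∈ (PySem.Dict.mk x).keys := by
    exact List.mem_map_of_mem hp
  by_cases hb : (p.2.toList.all (fun c => "AUCG".toList.contains c)) = true
  · rw [hb]
    simp only [List.nil_append, Bool.not_eq_eq_eq_not, Bool.not_true]
    simp only [List.contains_eq_mem, decide_eq_false_iff_not, List.mem_filter]
    rintro ⟨-, hbad⟩
    simp only [decide_eq_true_iff] at hbad
    rw [hget, bad_iff] at hbad
    exact hbad hb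
  · rw [Bool.eq_false_iff.mpr hb]
    simp only [List.nil_append, Bool.not_eq_eq_eq_not, Bool.not_false]
    simp only [List.contains_eq_mem, decide_eq_true_iff, List.mem_filter]
    exact ⟨hmemk, by rw [hget, bad_iff]; exact hb⟩
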